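-- pv_equiv track=rewrite | github.com/iLearn-Lab/EvoHarness | src/evo_harness/benchmark.py | _best_summary
-- ===== SOURCE A (Python) =====
-- from typing import Any, Callable
--
-- def _best_summary(messages: list[dict[str, Any]]) -> str:
--     for message in reversed(messages):
--         if message.get("role") == "assistant" and str(message.get("text", "")).strip():
--             return str(message.get("text", "")).strip()
--     for message in reversed(messages):
--         if str(message.get("text", "")).strip():
--             return str(message.get("text", "")).strip()
--     return ""
-- ===== SOURCE B (Python) =====
-- def _best_summary(messages: list[dict[str, object]]) -> str:
--     fallback = None
--     for message in reversed(messages):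
--         t = str(message.get("text", "")).strip()
--         if message.get("role") == "assistant" and t:
--             return t
--         if t and fallback is None:
--             fallback = t
--     return fallback if fallback is not None else ""
-- ===== Notes on version B (the rewrite author's own statement) =====
-- stated objective: simpler
-- what changed: Replaces A's two sequential reversed scans with a single reversed pass that returns immediately on an assistant message with nonempty stripped text and keeps the first nonempty stripped text seen as a fallback.
import Mathlib
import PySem

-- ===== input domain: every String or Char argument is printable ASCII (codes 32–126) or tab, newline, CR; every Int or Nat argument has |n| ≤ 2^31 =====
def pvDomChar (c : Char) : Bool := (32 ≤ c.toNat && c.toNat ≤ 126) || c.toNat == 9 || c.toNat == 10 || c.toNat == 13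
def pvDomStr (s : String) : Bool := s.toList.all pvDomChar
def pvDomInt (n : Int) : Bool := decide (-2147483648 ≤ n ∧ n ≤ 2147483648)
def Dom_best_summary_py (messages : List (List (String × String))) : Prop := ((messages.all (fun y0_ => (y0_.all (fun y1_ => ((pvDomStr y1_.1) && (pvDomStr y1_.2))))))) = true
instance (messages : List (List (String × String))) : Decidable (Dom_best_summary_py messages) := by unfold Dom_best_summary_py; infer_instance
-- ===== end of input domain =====

-- B collapses A's two reversed scans into one reversed pass with a fallback; objective: simpler.

-- ===== PORT A =====
-- first loop: for message in reversed(messages): if role=='assistant' and text.strip(): return …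
def pvALoop1 : List (List (String × String)) → Option String
  | [] => none
  | m :: rest =>
    if (PySem.Dict.mk m).get? "role" = some "assistant" ∧
        PySem.Str.strip ((PySem.Dict.mk m).getD "text" "") ≠ "" then
      some (PySem.Str.strip ((PySem.Dict.mk m).getD "text" ""))
    else pvALoop1 rest

-- second loop: for message in reversed(messages): if text.strip(): return …
def pvALoop2 : List (List (String × String)) → Option String
  | [] => none
  | m :: rest =>
    if PySem.Str.strip ((PySem.Dict.mk m).getD "text" "") ≠ "" then
      some (PySem.Str.strip ((PySem.Dict.mk m).getD "text" ""))
    else pvALoop2 rest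

def best_summary_py (messages : List (List (String × String))) : String :=
  match pvALoop1 messages.reverse with
  | some s => s
  | none =>
    match pvALoop2 messages.reverse with
    | some s => s
    | none => ""

-- ===== PORT B =====
-- single reversed pass carrying the fallback (first nonempty stripped text seen)
def pvBLoop : List (List (String × String)) → Option String → String
  | [], fb => fb.getD ""
  | m :: rest, fb =>
    let t := PySem.Str.strip ((PySem.Dict.mk m).getD "text" "")
    if (PySem.Dict.mk m).get? "role" = some "assistant" ∧ t ≠ "" then t
    else pvBLoop rest (if t ≠ "" ∧ fb = none then some t else fb)

def best_summary_py_alt (messages : List (List (String × String))) : String :=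
  pvBLoop messages.reverse none

-- ===== PRECONDITION & SPEC =====
def Spec_best_summary_py (messages : List (List (String × String))) (out : String) : Prop := out = best_summary_py_alt messages
instance (messages : List (List (String × String))) (out : String) : Decidable (Spec_best_summary_py messages out) := by unfold Spec_best_summary_py; infer_instance

-- ===== CLAIM (what is proved, stated in full; the proofs are below) =====
def Claim_equal_best_summary_py : Prop := ∀ (messages : List (List (String × String))), Dom_best_summary_py messages → Spec_best_summary_py messages (best_summary_py messages)

-- ===== LEMMAS AND PROOFS =====
-- invariant: B's single pass equals A's loop1, then the fallback, then A's loop2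
theorem pvBLoop_eq (l : List (List (String × String))) (fb : Option String) :
    pvBLoop l fb = ((pvALoop1 l).or (fb.or (pvALoop2 l))).getD "" := by
  induction l generalizing fb with
  | nil => cases fb <;> simp [pvBLoop, pvALoop1, pvALoop2]
  | cons m rest ih =>
    simp only [pvBLoop, pvALoop1, pvALoop2]
    by_cases h1 : (PySem.Dict.mk m).get? "role" = some "assistant" ∧
        PySem.Str.strip ((PySem.Dict.mk m).getD "text" "") ≠ ""
    · simp [h1]
    · simp only [h1, if_false]
      rw [ih]
      by_cases ht : PySem.Str.strip ((PySem.Dict.mk m).getD "text" "") ≠ ""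
      · cases fb <;> simp [ht]
      · cases fb <;> simp [ht]

-- ===== VERDICT (by name: the statement is the Claim_ definition above) =====
theorem best_summary_py_spec : Claim_equal_best_summary_py := by
  intro messages _
  unfold Spec_best_summary_py best_summary_py best_summary_py_alt
  rw [pvBLoop_eq]
  cases h1 : pvALoop1 messages.reverse <;> cases h2 : pvALoop2 messages.reverse <;> simp
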